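-- pv_equiv track=rewrite | github.com/xiu-G/AppInterpreter | build_corpus/save_corpus.py | get_api_name
-- ===== SOURCE A (Python) =====
-- def get_api_name(api_lists):
--     name_dic = {}
--     name2api_dic = {}
--     api2name_dic = {}
--     for api in api_lists:
--         items = api.split()
--         package = items[0][1:]
--         clazz = package.split('.')[-1].split('<')[0]
--         function = items[-1].split('(')[0]
--         if clazz+':'+function not in name_dic:
--             name_dic[clazz+':'+function] = ''
--             name2api_dic[clazz+':'+function] = [api]
--         else:
--             name2api_dic[clazz+':'+function].append(api)
--         api2name_dic[api] = clazz+':'+function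
--
--     return name_dic, name2api_dic, api2name_dic
-- ===== SOURCE B (Python) =====
-- def _key(api):
--     items = api.split()
--     return items[0][1:].split('.')[-1].split('<')[0] + ':' + items[-1].split('(')[0]
--
--
-- def get_api_name(api_lists):
--     keys = [_key(api) for api in api_lists]
--     order = list(dict.fromkeys(keys))
--     name_dic = {k: '' for k in order}
--     name2api_dic = {k: [a for a, kk in zip(api_lists, keys) if kk == k] for k in order}
--     api2name_dic = dict(zip(api_lists, keys))
--     return name_dic, name2api_dic, api2name_dic
-- ===== Notes on version B (the rewrite author's own statement) =====
-- stated objective: alternative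
-- what changed: Replaced A's single mutating loop (membership branch, in-place appends) by staged passes: map every api to its key once, dedup the key list with dict.fromkeys to get first-occurrence order, build name_dic and name2api_dic by per-key comprehensions (name2api_dic groups via a filter of zip(api_lists, keys)), and build api2name_dic as dict(zip(api_lists, keys)).
import Mathlib
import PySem

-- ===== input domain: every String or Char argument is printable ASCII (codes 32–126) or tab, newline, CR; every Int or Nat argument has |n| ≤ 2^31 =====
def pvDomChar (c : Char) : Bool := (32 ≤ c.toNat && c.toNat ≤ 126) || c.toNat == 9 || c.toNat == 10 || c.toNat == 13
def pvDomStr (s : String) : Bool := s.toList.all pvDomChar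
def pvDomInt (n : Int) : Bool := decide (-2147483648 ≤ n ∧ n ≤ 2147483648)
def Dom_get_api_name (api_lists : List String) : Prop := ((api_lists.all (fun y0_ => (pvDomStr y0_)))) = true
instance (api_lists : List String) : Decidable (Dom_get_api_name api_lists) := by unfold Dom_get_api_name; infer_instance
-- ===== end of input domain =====

-- B recomputes the result in staged passes (map keys, dedup via dict.fromkeys, per-key filter
-- grouping, dict(zip) for api2name) instead of A's single mutating loop (objective: alternative).


-- ===== PORT A =====
-- key parsing both Pythons share verbatim: clazz = items[0][1:].split('.')[-1].split('<')[0],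
-- function = items[-1].split('(')[0], key = clazz + ':' + function.  The .getD defaults are
-- never reached inside Pre_ (items ≠ [] there; str.split(sep) with sep ≠ '' is never []).
def pvKey (api : String) : String :=
  let items := PySem.Str.split₀ api
  let package := PySem.Str.slice ((PySem.List.pyGet? items 0).getD "") (some 1) none
  let clazz :=
    (PySem.List.pyGet?
      ((PySem.Str.split?
        ((PySem.List.pyGet? ((PySem.Str.split? package ".").getD []) (-1)).getD "") "<").getD []) 0).getD ""
  let function :=
    (PySem.List.pyGet?
      ((PySem.Str.split? ((PySem.List.pyGet? items (-1)).getD "") "(").getD []) 0).getD ""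
  clazz ++ ":" ++ function

-- A's loop body: the `if key not in name_dic` branch, then api2name_dic[api] = key
def pvStepA
    (st : PySem.Dict String String × PySem.Dict String (List String) × PySem.Dict String String)
    (api : String) :
    PySem.Dict String String × PySem.Dict String (List String) × PySem.Dict String String :=
  let key := pvKey api
  if st.1.contains key = false then
    (st.1.insert key "", st.2.1.insert key [api], st.2.2.insert api key)
  else
    (st.1, st.2.1.modify key [] (· ++ [api]), st.2.2.insert api key)

def get_api_name (api_lists : List String) :
    (List (String × String)) × (List (String × List String)) × (List (String × String)) :=
  let st := api_lists.foldl pvStepA (PySem.Dict.empty, PySem.Dict.empty, PySem.Dict.empty)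
  (st.1.items, st.2.1.items, st.2.2.items)

-- ===== PORT B =====
-- keys = [_key(api) ...]; order = list(dict.fromkeys(keys)); name_dic = {k:'' for k in order};
-- name2api_dic = {k: [a for a,kk in zip(api_lists,keys) if kk==k] for k in order};
-- api2name_dic = dict(zip(api_lists, keys))
def get_api_name_alt (api_lists : List String) :
    (List (String × String)) × (List (String × List String)) × (List (String × String)) :=
  let keys := api_lists.map pvKey
  let order := PySem.List.dedup keys
  let name_dic := order.map (fun k => (k, ""))
  let name2api := order.map
    (fun k => (k, ((api_lists.zip keys).filter (fun p => p.2 == k)).map (fun p => p.1)))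
  let api2name := (PySem.Dict.ofList (api_lists.zip keys)).items
  (name_dic, name2api, api2name)

-- ===== PRECONDITION & SPEC =====
-- Pre_ admits exactly the inputs where every element has a non-whitespace character: otherwise
-- api.split() == [] and A's items[0] raises IndexError (B raises at the same place).
def Pre_get_api_name (api_lists : List String) : Prop :=
  ∀ api ∈ api_lists, PySem.Str.split₀ api ≠ []
instance (api_lists : List String) : Decidable (Pre_get_api_name api_lists) := by
  unfold Pre_get_api_name; infer_instance
def pvWitness_get_api_name : List String :=
  ["Landroid.os.Parcel readString ()", "Landroid.os.Parcel writeString (x)"]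

def Spec_get_api_name (api_lists : List String)
    (out : (List (String × String)) × (List (String × List String)) × (List (String × String))) :
    Prop := out = get_api_name_alt api_lists
instance (api_lists : List String)
    (out : (List (String × String)) × (List (String × List String)) × (List (String × String))) :
    Decidable (Spec_get_api_name api_lists out) := by unfold Spec_get_api_name; infer_instance

-- ===== CLAIM (what is proved, stated in full; the proofs are below) =====
def Claim_equal_get_api_name : Prop := ∀ (api_lists : List String), Dom_get_api_name api_lists → Pre_get_api_name api_lists → Spec_get_api_name api_lists (get_api_name api_lists)

-- ===== LEMMAS AND PROOFS =====

-- abbreviation for B's grouping value at key k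
def pvGrp (l : List String) (k : String) : List String :=
  ((l.zip (l.map pvKey)).filter (fun p => p.2 == k)).map (fun p => p.1)

theorem pv_ofList_snoc (xs : List (String × String)) (p : String × String) :
    PySem.Dict.ofList (xs ++ [p]) = (PySem.Dict.ofList xs).insert p.1 p.2 := by
  simp [PySem.Dict.ofList, PySem.Dict.update, List.foldl_append]

theorem pv_grp_snoc (l : List String) (a : String) (k : String) :
    pvGrp (l ++ [a]) k = pvGrp l k ++ (if pvKey a == k then [a] else []) := by
  unfold pvGrp
  rw [List.map_append, List.zip_append (by simp), List.filter_append, List.map_append]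
  by_cases h : pvKey a = k <;> simp [h]

theorem pv_grp_not_mem (l : List String) (k : String) (h : k ∉ l.map pvKey) :
    pvGrp l k = [] := by
  unfold pvGrp
  rw [List.filter_eq_nil_iff.mpr, List.map_nil]
  intro p hp
  have := (List.of_mem_zip hp).2
  simp only [beq_iff_eq]
  intro he; exact h (he ▸ this)

-- the main characterisation of A's fold
theorem pv_foldA (l : List String) :
    l.foldl pvStepA (PySem.Dict.empty, PySem.Dict.empty, PySem.Dict.empty) =
      (PySem.Dict.mk ((PySem.Set.ofList (l.map pvKey)).map (fun k => (k, ""))),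
       PySem.Dict.mk ((PySem.Set.ofList (l.map pvKey)).map (fun k => (k, pvGrp l k))),
       PySem.Dict.ofList (l.zip (l.map pvKey))) := by
  induction l using List.reverseRecOn with
  | nil => rfl
  | append_singleton l a ih =>
    rw [List.foldl_append, ih]
    simp only [List.foldl_cons, List.foldl_nil]
    set ks := l.map pvKey with hks
    set ord : List String := PySem.Set.ofList ks with hord
    have hkeys1 : (PySem.Dict.mk (ord.map (fun k => (k, "")))).keys = ord := by
      simp [PySem.Dict.keys_mk, List.map_map, Function.comp_def]
    have hkeys2 : (PySem.Dict.mk (ord.map (fun k => (k, pvGrp l k)))).keys = ord := by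
      simp [PySem.Dict.keys_mk, List.map_map, Function.comp_def]
    have hmapk : (l ++ [a]).map pvKey = ks ++ [pvKey a] := by simp [hks]
    have hzip : (l ++ [a]).zip ((l ++ [a]).map pvKey) = l.zip ks ++ [(a, pvKey a)] := by
      rw [hmapk, List.zip_append (by rw [hks]; simp)]; rfl
    have hcont : (PySem.Dict.mk (ord.map (fun k => (k, "")))).contains (pvKey a)
        = decide (pvKey a ∈ ord) := by
      rw [PySem.Dict.contains_eq_decide_mem_keys, hkeys1]
    by_cases hk : pvKey a ∈ ks
    · -- existing key: name_dic unchanged, grouping value extended in place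
      have hko : pvKey a ∈ ord := (PySem.Set.mem_ofList ks (pvKey a)).mpr hk
      have hA : pvStepA
          (PySem.Dict.mk (ord.map (fun k => (k, ""))),
           PySem.Dict.mk (ord.map (fun k => (k, pvGrp l k))),
           PySem.Dict.ofList (l.zip ks)) a =
          (PySem.Dict.mk (ord.map (fun k => (k, ""))),
           (PySem.Dict.mk (ord.map (fun k => (k, pvGrp l k)))).modify (pvKey a) [] (· ++ [a]),
           (PySem.Dict.ofList (l.zip ks)).insert a (pvKey a)) := by
        simp [pvStepA, hcont, hko]
      rw [hA, hzip, hmapk, pv_ofList_snoc]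
      have hadd : PySem.Set.ofList (ks ++ [pvKey a]) = ord := by
        rw [PySem.Set.ofList_append_singleton, ← hord, PySem.Set.add_of_mem hko]
      rw [hadd]
      refine congrArg₂ _ rfl (congrArg₂ _ ?_ rfl)
      -- the modify: getD is pvGrp l (pvKey a), insert replaces in place
      have hnd : (PySem.Dict.mk (ord.map (fun k => (k, pvGrp l k)))).keys.Nodup := by
        rw [hkeys2, hord]; exact PySem.Set.nodup_ofList ks
      have hmem : (pvKey a, pvGrp l (pvKey a))
          ∈ (PySem.Dict.mk (ord.map (fun k => (k, pvGrp l k)))).items :=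
        List.mem_map.mpr ⟨pvKey a, hko, rfl⟩
      have hgetD := PySem.Dict.getD_of_mem_items _ hmem hnd []
      have hcont2 : (PySem.Dict.mk (ord.map (fun k => (k, pvGrp l k)))).contains (pvKey a) = true := by
        rw [PySem.Dict.contains_eq_decide_mem_keys, hkeys2]; simpa using hko
      apply PySem.Dict.ext
      rw [PySem.Dict.modify, hgetD, PySem.Dict.items_insert_of_contains _ _ hcont2]
      show (ord.map (fun k => (k, pvGrp l k))).map _ = _
      rw [List.map_map]
      apply List.map_congr_left
      intro k _
      by_cases hkk : k = pvKey a
      · subst hkk; simp [pv_grp_snoc]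
      · simp [pv_grp_snoc, hkk, Ne.symm hkk]
    · -- fresh key: both dicts append, the new group is [a]
      have hko : pvKey a ∉ ord := fun h => hk ((PySem.Set.mem_ofList ks (pvKey a)).mp h)
      have hA : pvStepA
          (PySem.Dict.mk (ord.map (fun k => (k, ""))),
           PySem.Dict.mk (ord.map (fun k => (k, pvGrp l k))),
           PySem.Dict.ofList (l.zip ks)) a =
          ((PySem.Dict.mk (ord.map (fun k => (k, "")))).insert (pvKey a) "",
           (PySem.Dict.mk (ord.map (fun k => (k, pvGrp l k)))).insert (pvKey a) [a],
           (PySem.Dict.ofList (l.zip ks)).insert a (pvKey a)) := by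
        simp [pvStepA, hcont, hko]
      rw [hA, hzip, hmapk, pv_ofList_snoc]
      have hadd : PySem.Set.ofList (ks ++ [pvKey a]) = ord ++ [pvKey a] := by
        rw [PySem.Set.ofList_append_singleton, ← hord, PySem.Set.add_of_not_mem hko]
      rw [hadd]
      have hc1 : (PySem.Dict.mk (ord.map (fun k => (k, "")))).contains (pvKey a) = false := by
        rw [hcont]; simpa using hko
      have hc2 : (PySem.Dict.mk (ord.map (fun k => (k, pvGrp l k)))).contains (pvKey a) = false := by
        rw [PySem.Dict.contains_eq_decide_mem_keys, hkeys2]; simpa using hko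
      refine congrArg₂ _ ?_ (congrArg₂ _ ?_ rfl)
      · apply PySem.Dict.ext
        rw [PySem.Dict.items_insert_of_not_contains _ _ hc1]
        simp
      · apply PySem.Dict.ext
        rw [PySem.Dict.items_insert_of_not_contains _ _ hc2]
        show ord.map (fun k => (k, pvGrp l k)) ++ [(pvKey a, [a])] = _
        rw [List.map_append]
        refine congrArg₂ _ ?_ ?_
        · apply List.map_congr_left
          intro k hkmem
          have hkne : pvKey a ≠ k := fun h => hko (h ▸ hkmem)
          simp [pv_grp_snoc, hkne]
        · simp [pv_grp_snoc, pv_grp_not_mem l (pvKey a) hk]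

-- ===== VERDICT (by name: the statement is the Claim_ definition above) =====
theorem get_api_name_spec : Claim_equal_get_api_name := by
  intro api_lists _ _
  unfold Spec_get_api_name get_api_name get_api_name_alt
  rw [pv_foldA]
  rfl
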